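-- pv_equiv track=rewrite | github.com/Moggi/python-playground | has_any_char.py | has_any
-- ===== SOURCE A (Python) =====
-- def has_any(s):
--     n = False
--     a = False
--     d = False
--     l = False
--     u = False
--     for i in s:
--         if not n and i.isalnum():
--             n = True
--         if not a and i.isalpha():
--             a = True
--         if not d and i.isdigit():
--             d = True
--         if not l and i.islower():
--             l = True
--         if not u and i.isupper():
--             u = True
--     return n, a, d, l, u
-- ===== SOURCE B (Python) =====
-- def has_any(s):
--     return (any(c.isalnum() for c in s),
--             any(c.isalpha() for c in s),
--             any(c.isdigit() for c in s),
--             any(c.islower() for c in s),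
--             any(c.isupper() for c in s))
-- ===== Notes on version B (the rewrite author's own statement) =====
-- stated objective: idiomatic
-- what changed: Replaced the single loop maintaining five sticky flags with five independent short-circuiting any(...) scans, one per predicate.
import Mathlib
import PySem

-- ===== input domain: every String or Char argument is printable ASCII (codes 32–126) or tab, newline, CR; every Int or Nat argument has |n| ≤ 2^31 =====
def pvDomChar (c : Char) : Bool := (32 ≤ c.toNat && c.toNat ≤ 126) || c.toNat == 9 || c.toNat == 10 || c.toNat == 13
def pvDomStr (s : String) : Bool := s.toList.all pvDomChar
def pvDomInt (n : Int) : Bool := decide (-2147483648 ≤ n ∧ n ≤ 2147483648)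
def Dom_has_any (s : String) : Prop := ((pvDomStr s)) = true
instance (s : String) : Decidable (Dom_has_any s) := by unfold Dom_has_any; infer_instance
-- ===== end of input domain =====

-- B replaces A's single pass with five sticky flags by five independent short-circuiting scans (idiomatic).

-- ===== PORT A =====
-- A's loop: fold over the characters with the five-flag state, branches in A's order.
def has_any_loop (st : Bool × Bool × Bool × Bool × Bool) (i : Char) :
    Bool × Bool × Bool × Bool × Bool :=
  let (n, a, d, l, u) := st
  let n := if !n && PySem.Chars.isalnum i then true else n
  let a := if !a && PySem.Chars.isalpha i then true else a
  let d := if !d && PySem.Chars.isdigit i then true else d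
  let l := if !l && PySem.Chars.islower i then true else l
  let u := if !u && PySem.Chars.isupper i then true else u
  (n, a, d, l, u)

def has_any (s : String) : Bool × Bool × Bool × Bool × Bool :=
  s.toList.foldl has_any_loop (false, false, false, false, false)

-- ===== PORT B =====
def has_any_alt (s : String) : Bool × Bool × Bool × Bool × Bool :=
  (s.toList.any PySem.Chars.isalnum,
   s.toList.any PySem.Chars.isalpha,
   s.toList.any PySem.Chars.isdigit,
   s.toList.any PySem.Chars.islower,
   s.toList.any PySem.Chars.isupper)

-- ===== PRECONDITION & SPEC =====
def Spec_has_any (s : String) (out : Bool × Bool × Bool × Bool × Bool) : Prop := out = has_any_alt s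
instance (s : String) (out : Bool × Bool × Bool × Bool × Bool) : Decidable (Spec_has_any s out) := by unfold Spec_has_any; infer_instance

-- ===== CLAIM (what is proved, stated in full; the proofs are below) =====
def Claim_equal_has_any : Prop := ∀ (s : String), Dom_has_any s → Spec_has_any s (has_any s)

-- ===== LEMMAS AND PROOFS =====
theorem has_any_loop_eq (cs : List Char) (n a d l u : Bool) :
    cs.foldl has_any_loop (n, a, d, l, u) =
      (n || cs.any PySem.Chars.isalnum,
       a || cs.any PySem.Chars.isalpha,
       d || cs.any PySem.Chars.isdigit,
       l || cs.any PySem.Chars.islower,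
       u || cs.any PySem.Chars.isupper) := by
  induction cs generalizing n a d l u with
  | nil => simp
  | cons c cs ih =>
    simp only [List.foldl_cons, List.any_cons, has_any_loop, ih]
    cases n <;> cases a <;> cases d <;> cases l <;> cases u <;> simp [Bool.or_comm]

-- ===== VERDICT (by name: the statement is the Claim_ definition above) =====
theorem has_any_spec : Claim_equal_has_any := by
  intro s _
  unfold Spec_has_any has_any has_any_alt
  simp [has_any_loop_eq]
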